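-- pv_equiv track=rewrite | github.com/OromenVideos/video-silabas | create_transducer.py | onset_nucleus_coda
-- ===== SOURCE A (Python) =====
-- from typing import List
--
-- def onset_nucleus_coda(phones: List[str]) -> [List[str], List[str], List[str]]:
--     out = [], [], []
--     for ph in phones:
--         if ph in 'aeiou':
--             out[1].append(ph)
--         elif out[1]:
--             out[2].append(ph)
--         else:
--             out[0].append(ph)
--     return tuple(map(lambda x: ' '.join(x), out))
-- ===== SOURCE B (Python) =====
-- def onset_nucleus_coda(phones):
--     idx = next((i for i, ph in enumerate(phones) if ph in 'aeiou'), len(phones))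
--     onset = phones[:idx]
--     nucleus = [ph for ph in phones if ph in 'aeiou']
--     coda = [ph for ph in phones[idx:] if ph not in 'aeiou']
--     return tuple(' '.join(x) for x in (onset, nucleus, coda))
-- ===== Notes on version B (the rewrite author's own statement) =====
-- stated objective: alternative
-- what changed: Replaces the single stateful pass with a mutable flag (nucleus non-empty) by an index-first decomposition: find the first-vowel index, then onset = prefix before it, nucleus = all vowel phones, coda = non-vowel phones from that index on.
import Mathlib
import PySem

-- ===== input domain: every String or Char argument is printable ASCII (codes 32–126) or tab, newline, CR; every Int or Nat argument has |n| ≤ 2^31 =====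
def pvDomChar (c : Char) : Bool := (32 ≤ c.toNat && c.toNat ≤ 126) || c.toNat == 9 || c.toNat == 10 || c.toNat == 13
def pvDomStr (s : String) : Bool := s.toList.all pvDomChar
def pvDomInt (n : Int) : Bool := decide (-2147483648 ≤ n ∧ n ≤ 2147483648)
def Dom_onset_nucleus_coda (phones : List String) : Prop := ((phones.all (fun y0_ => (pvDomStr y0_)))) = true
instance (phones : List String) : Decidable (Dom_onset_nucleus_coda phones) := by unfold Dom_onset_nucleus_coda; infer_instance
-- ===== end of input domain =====

-- B replaces A's single stateful pass (flag = nucleus non-empty) by an index-first decomposition: first-vowel index, then prefix / vowel-filter / suffix-non-vowel-filter; same cost, alternative structure.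


-- ===== PORT A =====
def onset_nucleus_coda (phones : List String) : String × String × String :=
  let out := phones.foldl
    (fun (out : List String × List String × List String) ph =>
      if PySem.Str.isIn ph "aeiou" then (out.1, out.2.1 ++ [ph], out.2.2)
      else if out.2.1 ≠ [] then (out.1, out.2.1, out.2.2 ++ [ph])
      else (out.1 ++ [ph], out.2.1, out.2.2))
    ([], [], [])
  (PySem.Str.join " " out.1, PySem.Str.join " " out.2.1, PySem.Str.join " " out.2.2)

-- ===== PORT B =====
def onset_nucleus_coda_alt (phones : List String) : String × String × String :=
  let idx := (phones.findIdx? (fun ph => PySem.Str.isIn ph "aeiou")).getD phones.length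
  let onset := phones.take idx
  let nucleus := phones.filter (fun ph => PySem.Str.isIn ph "aeiou")
  let coda := (phones.drop idx).filter (fun ph => !PySem.Str.isIn ph "aeiou")
  (PySem.Str.join " " onset, PySem.Str.join " " nucleus, PySem.Str.join " " coda)

-- ===== PRECONDITION & SPEC =====
def Spec_onset_nucleus_coda (phones : List String) (out : String × String × String) : Prop := out = onset_nucleus_coda_alt phones
instance (phones : List String) (out : String × String × String) : Decidable (Spec_onset_nucleus_coda phones out) := by unfold Spec_onset_nucleus_coda; infer_instance

-- ===== CLAIM (what is proved, stated in full; the proofs are below) =====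
def Claim_equal_onset_nucleus_coda : Prop := ∀ (phones : List String), Dom_onset_nucleus_coda phones → Spec_onset_nucleus_coda phones (onset_nucleus_coda phones)

-- ===== LEMMAS AND PROOFS =====

-- step function of A's loop, named for the lemmas
def oncStep (out : List String × List String × List String) (ph : String) :
    List String × List String × List String :=
  if PySem.Str.isIn ph "aeiou" then (out.1, out.2.1 ++ [ph], out.2.2)
  else if out.2.1 ≠ [] then (out.1, out.2.1, out.2.2 ++ [ph])
  else (out.1 ++ [ph], out.2.1, out.2.2)

-- once the nucleus is non-empty, A's loop sends vowels to the nucleus and the rest to the coda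
theorem fold_nonempty (rest : List String) (o n c : List String) (hn : n ≠ []) :
    rest.foldl oncStep (o, n, c) =
      (o, n ++ rest.filter (fun ph => PySem.Str.isIn ph "aeiou"),
        c ++ rest.filter (fun ph => !PySem.Str.isIn ph "aeiou")) := by
  induction rest generalizing n c with
  | nil => simp
  | cons ph t ih =>
    simp only [List.foldl_cons, oncStep, List.filter_cons]
    by_cases h : PySem.Str.isIn ph "aeiou"
    · rw [if_pos h, ih (n ++ [ph]) c (by simp)]
      simp_all
    · rw [if_neg h, if_pos hn, ih n (c ++ [ph]) hn]
      simp_all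

-- while the nucleus is still empty, A's fold computes B's three lists
theorem fold_from_empty (rest : List String) (o c : List String) :
    rest.foldl oncStep (o, [], c) =
      (o ++ rest.take ((rest.findIdx? (fun ph => PySem.Str.isIn ph "aeiou")).getD rest.length),
        rest.filter (fun ph => PySem.Str.isIn ph "aeiou"),
        c ++ (rest.drop ((rest.findIdx? (fun ph => PySem.Str.isIn ph "aeiou")).getD rest.length)).filter
          (fun ph => !PySem.Str.isIn ph "aeiou")) := by
  induction rest generalizing o c with
  | nil => simp
  | cons ph t ih =>
    simp only [List.foldl_cons, List.findIdx?_cons]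
    by_cases h : PySem.Str.isIn ph "aeiou"
    · rw [show oncStep (o, [], c) ph = (o, [] ++ [ph], c) from if_pos h,
        fold_nonempty t o ([] ++ [ph]) c (by simp)]
      simp_all
    · rw [show oncStep (o, [], c) ph = (o ++ [ph], [], c) from by
          simp only [oncStep]; rw [if_neg h, if_neg (by simp)],
        ih (o ++ [ph]) c]
      cases hf : t.findIdx? (fun ph => PySem.Str.isIn ph "aeiou") with
      | none => simp_all
      | some i => simp_all

-- ===== VERDICT (by name: the statement is the Claim_ definition above) =====
theorem onset_nucleus_coda_spec : Claim_equal_onset_nucleus_coda := by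
  intro phones _
  unfold Spec_onset_nucleus_coda onset_nucleus_coda onset_nucleus_coda_alt
  exact congrArg (fun r : List String × List String × List String =>
    (PySem.Str.join " " r.1, PySem.Str.join " " r.2.1, PySem.Str.join " " r.2.2))
    (fold_from_empty phones [] [])
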